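-- pv_equiv track=rewrite | github.com/burnsaustin145/Markov_1 | fetch_data.py | gen_pairs
-- ===== SOURCE A (Python) =====
-- def gen_pairs(strtext_data):
--     list1 = ['offset']
--     list2 = []
--     split_x = strtext_data.split()
--
--     for word in split_x:
--         list1.append(word)
--     for word in split_x:
--         list2.append(word)
--     pairs_list = zip(list1, list2)
--     pairs_list = list(pairs_list)
--
--
--     return pairs_list
-- ===== SOURCE B (Python) =====
-- def gen_pairs(strtext_data):
--     pairs = []
--     prev = 'offset'
--     for word in strtext_data.split():
--         pairs.append((prev, word))
--         prev = word
--     return pairs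
-- ===== Notes on version B (the rewrite author's own statement) =====
-- stated objective: simpler
-- what changed: Replaces building two parallel lists (['offset']+words and words) and zipping them with a single sliding-window pass that keeps only a running previous token.
import Mathlib
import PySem

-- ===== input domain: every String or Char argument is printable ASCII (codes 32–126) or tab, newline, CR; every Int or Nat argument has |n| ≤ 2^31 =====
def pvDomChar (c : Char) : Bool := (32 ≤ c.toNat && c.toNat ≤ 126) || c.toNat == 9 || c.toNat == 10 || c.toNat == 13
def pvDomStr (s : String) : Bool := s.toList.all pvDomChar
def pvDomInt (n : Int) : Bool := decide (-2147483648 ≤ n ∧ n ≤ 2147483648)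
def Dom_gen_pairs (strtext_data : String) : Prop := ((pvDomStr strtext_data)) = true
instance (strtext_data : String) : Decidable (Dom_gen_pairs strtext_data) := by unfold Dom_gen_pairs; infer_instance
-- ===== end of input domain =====

-- ===== PORT A =====
-- B replaces two parallel lists + zip with one sliding-window pass keeping a running previous token (objective: simpler).
def gen_pairs (strtext_data : String) : List (String × String) :=
  let split_x := PySem.Str.split₀ strtext_data
  let list1 := "offset" :: split_x
  let list2 := split_x
  List.zip list1 list2

-- ===== PORT B =====
def genPairsLoop (prev : String) : List String → List (String × String)
  | [] => []
  | w :: ws => (prev, w) :: genPairsLoop w ws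

def gen_pairs_alt (strtext_data : String) : List (String × String) :=
  genPairsLoop "offset" (PySem.Str.split₀ strtext_data)

-- ===== PRECONDITION & SPEC =====
def Spec_gen_pairs (strtext_data : String) (out : List (String × String)) : Prop := out = gen_pairs_alt strtext_data
instance (strtext_data : String) (out : List (String × String)) : Decidable (Spec_gen_pairs strtext_data out) := by unfold Spec_gen_pairs; infer_instance

-- ===== CLAIM (what is proved, stated in full; the proofs are below) =====
def Claim_equal_gen_pairs : Prop := ∀ (strtext_data : String), Dom_gen_pairs strtext_data → Spec_gen_pairs strtext_data (gen_pairs strtext_data)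

-- ===== LEMMAS AND PROOFS =====

-- ===== VERDICT (by name: the statement is the Claim_ definition above) =====
theorem genPairsLoop_eq_zip (prev : String) (ws : List String) :
    genPairsLoop prev ws = List.zip (prev :: ws) ws := by
  induction ws generalizing prev with
  | nil => rfl
  | cons w ws ih => simp [genPairsLoop, List.zip, ih w]

theorem gen_pairs_spec : Claim_equal_gen_pairs := by
  intro s _
  unfold Spec_gen_pairs gen_pairs gen_pairs_alt
  rw [genPairsLoop_eq_zip]
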